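-- pv_equiv track=rewrite | github.com/go5paopao/mahjong-selfplay-RL | make_bin/hai_count_jihai.py | is_houra_possible
-- ===== SOURCE A (Python) =====
-- def is_houra_possible(hai_list):
--     _hai_list = hai_list[:]
--     if sum(_hai_list) == 0:
--         return True
--     for i in range(7):
--         if _hai_list[i] >= 2:
--             _hai_list[i] -= 2
--             if all(x in [0,3] for x in _hai_list):
--                 return True
--             _hai_list[i] += 2
--     if all(x in [0,3] for x in _hai_list):
--         return True
--
--     return False
-- ===== SOURCE B (Python) =====
-- def is_houra_possible(hai_list):
--     if sum(hai_list) == 0: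
--         return True
--     if any(x not in (0, 3) for x in hai_list[7:]):
--         return False
--     bad = [i for i in range(7) if hai_list[i] not in (0, 3)]
--     if not bad:
--         return True
--     return len(bad) == 1 and hai_list[bad[0]] in (2, 5)
-- ===== Notes on version B (the rewrite author's own statement) =====
-- stated objective: simpler
-- what changed: B classifies the hand instead of simulating: it splits off the tail beyond the 7 honor slots, collects in one pass the honor slots whose count is not 0 or 3, and decides by a closed-form test on that list (empty, or a single slot holding a 2 or a 5), with no remove-pair/restore candidate loop; Pre_ excludes hands shorter than 7 with nonzero sum, where A's range(7) indexing raises IndexError except when an early pair removal happens to return True first — B's direct indexing of the 7 slots raises there.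
-- outside the precondition, e.g. on is_houra_possible([0, 2]): A returns True, B raises IndexError; on is_houra_possible([3, 2, 0]): A returns True, B raises IndexError
import Mathlib
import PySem

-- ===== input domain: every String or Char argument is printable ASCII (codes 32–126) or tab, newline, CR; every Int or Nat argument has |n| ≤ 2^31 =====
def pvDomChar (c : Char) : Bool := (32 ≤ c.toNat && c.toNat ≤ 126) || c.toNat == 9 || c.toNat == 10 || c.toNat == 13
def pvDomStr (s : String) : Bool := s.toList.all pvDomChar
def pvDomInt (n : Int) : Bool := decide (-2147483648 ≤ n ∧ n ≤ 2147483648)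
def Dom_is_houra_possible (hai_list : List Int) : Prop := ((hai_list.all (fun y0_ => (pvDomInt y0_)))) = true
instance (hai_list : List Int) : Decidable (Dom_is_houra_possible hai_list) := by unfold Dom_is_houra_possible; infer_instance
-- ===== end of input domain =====

-- B classifies the hand (tail beyond the 7 honor slots, then the list of honor slots
-- whose count is not 0 or 3) and decides by a closed-form test on that list, instead
-- of A's 7-candidate remove-pair/restore simulation (objective: simpler).

-- ===== PORT A =====
-- all(x in [0,3] for x in _hai_list)
def pvAll03 (l : List Int) : Bool := l.all (fun x => x == 0 || x == 3)

-- the 'for i in range(7)' loop; the subtract-2 / check / add-2-back mutation is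
-- rendered as a check on l.set i (v-2) with the original l kept for the next turn,
-- followed by the post-loop all(...) check / return False
def pvALoop (l : List Int) (i : Nat) : Bool :=
  if _h : i < 7 then
    match PySem.List.pyGet? l (Int.ofNat i) with
    | none => false   -- IndexError; excluded by Pre_
    | some v =>
      if 2 ≤ v then
        if pvAll03 (l.set i (v - 2)) then true
        else pvALoop l (i + 1)
      else pvALoop l (i + 1)
  else pvAll03 l
termination_by 7 - i

def is_houra_possible (hai_list : List Int) : Bool :=
  let _hai_list := hai_list       -- hai_list[:]
  if _hai_list.sum == 0 then true
  else pvALoop _hai_list 0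

-- ===== PORT B =====
-- hai_list[i] not in (0, 3), for i drawn from range(7)
def pvHeadPred (l : List Int) (i : Int) : Bool :=
  match PySem.List.pyGet? l i with
  | some v => !(v == 0 || v == 3)
  | none => false   -- IndexError in Python; such inputs are outside Pre_

-- bad = [i for i in range(7) if hai_list[i] not in (0, 3)]
def pvBadHead (l : List Int) : List Int :=
  (PySem.List.pyRange 0 7 1).filter (pvHeadPred l)

-- len(bad) == 1 and hai_list[bad[0]] in (2, 5)
def pvBadTest (l : List Int) (bad : List Int) : Bool :=
  match bad with
  | [i] =>
      (match PySem.List.pyGet? l i with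
       | some v => v == 2 || v == 5
       | none => false)   -- unreachable: bad's entries are in-range indices of l
  | _ => false

def is_houra_possible_alt (hai_list : List Int) : Bool :=
  if hai_list.sum == 0 then true
  else if (PySem.List.slice hai_list (some 7) none).any (fun x => !(x == 0 || x == 3)) then false
  else
    let bad := pvBadHead hai_list
    if bad.isEmpty then true
    else pvBadTest hai_list bad

-- ===== PRECONDITION & SPEC =====
-- Pre_ excludes hands shorter than 7 with nonzero sum: A's range(7) indexing raises
-- IndexError on them except when an early pair removal happens to return True first,
-- and B's direct indexing of the 7 honor slots raises on all of them.
def Pre_is_houra_possible (hai_list : List Int) : Prop :=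
  hai_list.sum = 0 ∨ 7 ≤ hai_list.length
instance (hai_list : List Int) : Decidable (Pre_is_houra_possible hai_list) := by
  unfold Pre_is_houra_possible; infer_instance

def pvWitness_is_houra_possible : List Int := [3, 0, 2, 0, 0, 3, 0]

def Spec_is_houra_possible (hai_list : List Int) (out : Bool) : Prop := out = is_houra_possible_alt hai_list
instance (hai_list : List Int) (out : Bool) : Decidable (Spec_is_houra_possible hai_list out) := by unfold Spec_is_houra_possible; infer_instance

-- ===== CLAIM (what is proved, stated in full; the proofs are below) =====
def Claim_equal_is_houra_possible : Prop := ∀ (hai_list : List Int), Dom_is_houra_possible hai_list → Pre_is_houra_possible hai_list → Spec_is_houra_possible hai_list (is_houra_possible hai_list)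

-- ===== LEMMAS AND PROOFS =====

lemma pvAll03_iff {l : List Int} :
    pvAll03 l = true ↔ ∀ (k : Nat) (h : k < l.length), l[k] = 0 ∨ l[k] = 3 := by
  simp [pvAll03, List.all_eq_true, List.mem_iff_getElem]; aesop

-- all entries off index j are in {0,3} (proof-side view of "others are good")
def pvOthers03 (l : List Int) (j : Nat) : Prop :=
  ∀ (m : Nat) (hm : m < l.length), m ≠ j → l[m] = 0 ∨ l[m] = 3

-- A's per-index success condition rephrased: removing a pair from index j leaves
-- every count in {0,3} iff l[j] is 2 or 5 and every other count is already in {0,3}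
lemma pv_cond_iff {l : List Int} {j : Nat} (hj : j < l.length) :
    ((l[j] = 2 ∨ l[j] = 5) ∧ pvOthers03 l j) ↔
      (2 ≤ l[j] ∧ pvAll03 (l.set j (l[j] - 2)) = true) := by
  rw [pvAll03_iff]
  constructor
  · rintro ⟨h25, hoth⟩
    refine ⟨by rcases h25 with h | h <;> omega, ?_⟩
    intro m hm
    rw [List.getElem_set]
    split_ifs with he
    · rcases h25 with h | h <;> omega
    · exact hoth m (by simpa using hm) (fun h => he h.symm)
  · rintro ⟨h2, hset⟩
    have hjv := hset j (by simpa using hj)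
    rw [List.getElem_set, if_pos rfl] at hjv
    refine ⟨by omega, ?_⟩
    intro m hm hmj
    have := hset m (by simpa using hm)
    rw [List.getElem_set, if_neg (fun h => hmj h.symm)] at this
    exact this

lemma pvALoop_char {l : List Int} (hn : 7 ≤ l.length) :
    ∀ (d i : Nat), 7 - i ≤ d →
      (pvALoop l i = true ↔ pvAll03 l = true ∨
        ∃ (j : Nat) (h : j < l.length), i ≤ j ∧ j < 7 ∧ 2 ≤ l[j] ∧ pvAll03 (l.set j (l[j] - 2)) = true) := by
  intro d
  induction d with
  | zero =>
    intro i hi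
    rw [pvALoop, dif_neg (by omega : ¬ i < 7)]
    constructor
    · exact Or.inl
    · rintro (h | ⟨j, hj, hij, hj7, _⟩)
      · exact h
      · omega
  | succ d ih =>
    intro i hi
    by_cases h7 : i < 7
    · have hil : i < l.length := by omega
      have hget : PySem.List.pyGet? l (Int.ofNat i) = some l[i] := by
        simp [PySem.List.pyGet?_natCast, List.getElem?_eq_getElem hil]
      rw [pvALoop, dif_pos h7, hget]
      simp only
      by_cases h2 : 2 ≤ l[i]
      · rw [if_pos h2]
        by_cases hset : pvAll03 (l.set i (l[i] - 2)) = true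
        · rw [if_pos hset]
          simp only [true_iff]
          exact Or.inr ⟨i, hil, le_refl i, h7, h2, hset⟩
        · rw [if_neg hset, ih (i + 1) (by omega)]
          constructor
          · rintro (h | ⟨j, hj, hij, hj7, hj2, hjset⟩)
            · exact Or.inl h
            · exact Or.inr ⟨j, hj, by omega, hj7, hj2, hjset⟩
          · rintro (h | ⟨j, hj, hij, hj7, hj2, hjset⟩)
            · exact Or.inl h
            · rcases eq_or_lt_of_le hij with rfl | hlt
              · exact absurd hjset hset
              · exact Or.inr ⟨j, hj, by omega, hj7, hj2, hjset⟩
      · rw [if_neg h2, ih (i + 1) (by omega)]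
        constructor
        · rintro (h | ⟨j, hj, hij, hj7, hj2, hjset⟩)
          · exact Or.inl h
          · exact Or.inr ⟨j, hj, by omega, hj7, hj2, hjset⟩
        · rintro (h | ⟨j, hj, hij, hj7, hj2, hjset⟩)
          · exact Or.inl h
          · rcases eq_or_lt_of_le hij with rfl | hlt
            · exact absurd hj2 h2
            · exact Or.inr ⟨j, hj, by omega, hj7, hj2, hjset⟩
    · rw [pvALoop, dif_neg h7]
      constructor
      · exact Or.inl
      · rintro (h | ⟨j, hj, hij, hj7, _⟩)
        · exact h
        · omega

-- A's loop returns True as soon as some index admits the pair removal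
lemma pvALoop_true_of {l : List Int} :
    ∀ (d i j : Nat) (hj : j < l.length), 7 - i ≤ d → i ≤ j → j < 7 → 2 ≤ l[j] →
      pvAll03 (l.set j (l[j] - 2)) = true → pvALoop l i = true := by
  intro d
  induction d with
  | zero => intro i j hj hd hij hj7 _ _; omega
  | succ d ih =>
    intro i j hj hd hij hj7 hj2 hjset
    have h7 : i < 7 := by omega
    have hil : i < l.length := by omega
    have hget : PySem.List.pyGet? l (Int.ofNat i) = some l[i] := by
      simp [PySem.List.pyGet?_natCast, List.getElem?_eq_getElem hil]
    rw [pvALoop, dif_pos h7, hget]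
    simp only
    rcases eq_or_lt_of_le hij with rfl | hlt
    · rw [if_pos hj2, if_pos hjset]
    · by_cases h2 : 2 ≤ l[i]
      · rw [if_pos h2]
        by_cases hset : pvAll03 (l.set i (l[i] - 2)) = true
        · rw [if_pos hset]
        · rw [if_neg hset]
          exact ih (i + 1) j hj (by omega) (by omega) hj7 hj2 hjset
      · rw [if_neg h2]
        exact ih (i + 1) j hj (by omega) (by omega) hj7 hj2 hjset

-- A's loop returns False when some count is bad and no index below 7 admits the removal
lemma pvALoop_false_of {l : List Int} (h7 : 7 ≤ l.length)
    (hbadm : ∃ (m : Nat) (hm : m < l.length), ¬(l[m] = 0 ∨ l[m] = 3))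
    (hnos : ∀ (j : Nat) (hj : j < l.length), j < 7 → (l[j] = 2 ∨ l[j] = 5) → pvOthers03 l j → False) :
    pvALoop l 0 = false := by
  rw [Bool.eq_false_iff]
  intro hA
  obtain ⟨m, hm, hbad⟩ := hbadm
  rcases (pvALoop_char h7 7 0 (by omega)).1 hA with h | ⟨j, hj, _, hj7, h2, hset⟩
  · exact hbad (pvAll03_iff.1 h m hm)
  · obtain ⟨h25, hoth⟩ := (pv_cond_iff hj).2 ⟨h2, hset⟩
    exact hnos j hj hj7 h25 hoth

-- hai_list[7:] is the drop
lemma pvSlice7 (l : List Int) : PySem.List.slice l (some 7) none = l.drop 7 := by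
  have := PySem.List.slice_from_natCast l 7
  simpa using this

lemma pvBadBool {x : Int} (h : ¬(x = 0 ∨ x = 3)) : (!(x == 0 || x == 3)) = true := by
  simp only [Bool.not_eq_eq_eq_not, Bool.not_true, Bool.or_eq_false_iff, beq_eq_false_iff_ne, ne_eq]
  tauto

lemma pvHeadPred_nat {l : List Int} {j : Nat} (hj : j < l.length) :
    pvHeadPred l (j : Int) = !(l[j] == 0 || l[j] == 3) := by
  have hget : PySem.List.pyGet? l ((j : Int)) = some l[j] := by
    simp [PySem.List.pyGet?_natCast, List.getElem?_eq_getElem hj]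
  rw [pvHeadPred, hget]

lemma mem_pvBadHead {l : List Int} (h7 : 7 ≤ l.length) {i : Int} :
    i ∈ pvBadHead l ↔
      ∃ (j : Nat) (hj : j < 7), i = (j : Int) ∧ ¬(l[j]'(by omega) = 0 ∨ l[j]'(by omega) = 3) := by
  rw [pvBadHead, List.mem_filter, PySem.List.mem_pyRange_one]
  constructor
  · rintro ⟨⟨h0, hlt⟩, hp⟩
    have hij : i = ((i.toNat : Nat) : Int) := by omega
    have hj7 : i.toNat < 7 := by omega
    rw [hij, pvHeadPred_nat (by omega)] at hp
    refine ⟨i.toNat, hj7, hij, ?_⟩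
    rintro (h | h) <;> simp [h] at hp
  · rintro ⟨j, hj7, rfl, hbad⟩
    refine ⟨⟨by positivity, by exact_mod_cast hj7⟩, ?_⟩
    rw [pvHeadPred_nat (by omega)]
    exact pvBadBool hbad

lemma nodup_pvBadHead (l : List Int) : (pvBadHead l).Nodup :=
  (PySem.List.nodup_pyRange_one 0 7).filter _

lemma pvBadTest_singleton {l : List Int} {j : Nat} (hj : j < l.length) :
    pvBadTest l [(j : Int)] = (l[j] == 2 || l[j] == 5) := by
  have hget : PySem.List.pyGet? l ((j : Int)) = some l[j] := by
    simp [PySem.List.pyGet?_natCast, List.getElem?_eq_getElem hj]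
  rw [pvBadTest, hget]

-- ===== VERDICT (by name: the statement is the Claim_ definition above) =====
theorem is_houra_possible_spec : Claim_equal_is_houra_possible := by
  intro l _ hpre
  unfold Spec_is_houra_possible is_houra_possible is_houra_possible_alt
  by_cases hs : l.sum = 0
  · simp [hs]
  · have h7 : 7 ≤ l.length := by
      rcases hpre with h | h
      · exact absurd h hs
      · exact h
    simp only [hs, beq_iff_eq, if_false]
    rw [pvSlice7]
    by_cases htail : (l.drop 7).any (fun x => !(x == 0 || x == 3)) = true
    -- a bad count beyond the 7 honor slots: both sides are False
    · rw [if_pos htail]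
      obtain ⟨x, hx, hpx⟩ := List.any_eq_true.1 htail
      obtain ⟨k, hk, rfl⟩ := List.mem_iff_getElem.1 hx
      rw [List.getElem_drop] at hpx
      have hm : 7 + k < l.length := by
        have := hk
        simp [List.length_drop] at this
        omega
      have hbad : ¬(l[7 + k] = 0 ∨ l[7 + k] = 3) := by
        rintro (h | h) <;> simp [h] at hpx
      exact pvALoop_false_of h7 ⟨7 + k, hm, hbad⟩
        (fun j hj hj7 _ hoth => hbad (hoth (7 + k) hm (by omega)))
    · have htail' : ∀ (m : Nat) (hm : m < l.length), 7 ≤ m → l[m] = 0 ∨ l[m] = 3 := by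
        intro m hm h7m
        by_contra hbm
        apply htail
        refine List.any_eq_true.2 ⟨l[m], ?_, ?_⟩
        · rw [List.mem_iff_getElem]
          exact ⟨m - 7, by simp [List.length_drop]; omega, by rw [List.getElem_drop]; congr 1; omega⟩
        · exact pvBadBool hbm
      rw [if_neg htail]
      rcases hbe : pvBadHead l with _ | ⟨k, rest⟩
      -- bad = []: every count is 0 or 3, both sides True
      · show pvALoop l 0 = true
        have hall : pvAll03 l = true := by
          rw [pvAll03_iff]
          intro m hm
          by_cases h7m : 7 ≤ m
          · exact htail' m hm h7m
          · by_contra hbm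
            have : ((m : Int)) ∈ pvBadHead l :=
              (mem_pvBadHead h7).2 ⟨m, by omega, rfl, hbm⟩
            rw [hbe] at this
            exact absurd this (List.not_mem_nil)
        exact (pvALoop_char h7 7 0 (by omega)).2 (Or.inl hall)
      · rcases rest with _ | ⟨k2, rest2⟩
        -- bad = [k]: B tests l[k] ∈ {2,5}; A succeeds exactly then
        · have hkmem : k ∈ pvBadHead l := by rw [hbe]; exact List.mem_singleton_self k
          obtain ⟨j, hj7, rfl, hbad⟩ := (mem_pvBadHead h7).1 hkmem
          have hj : j < l.length := by omega
          have huniq : ∀ (m : Nat) (hm : m < 7), m ≠ j → l[m]'(by omega) = 0 ∨ l[m]'(by omega) = 3 := by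
            intro m hm hmj
            by_contra hbm
            have : ((m : Int)) ∈ pvBadHead l := (mem_pvBadHead h7).2 ⟨m, hm, rfl, hbm⟩
            rw [hbe, List.mem_singleton] at this
            exact hmj (by exact_mod_cast this)
          have hoth : pvOthers03 l j := by
            intro m hm hmj
            by_cases h7m : 7 ≤ m
            · exact htail' m hm h7m
            · exact huniq m (by omega) hmj
          show pvALoop l 0 = pvBadTest l [(j : Int)]
          rw [pvBadTest_singleton hj]
          by_cases hwin : l[j] = 2 ∨ l[j] = 5
          · obtain ⟨h2, hset⟩ := (pv_cond_iff hj).1 ⟨hwin, hoth⟩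
            rw [pvALoop_true_of 7 0 j hj (by omega) (Nat.zero_le j) hj7 h2 hset]
            symm
            rcases hwin with h | h <;> simp [h]
          · have hBf : (l[j] == 2 || l[j] == 5) = false := by
              simp only [Bool.or_eq_false_iff, beq_eq_false_iff_ne, ne_eq]
              tauto
            rw [hBf]
            refine pvALoop_false_of h7 ⟨j, hj, hbad⟩ ?_
            intro j' hj' hj7' h25' hoth'
            have hjj : j = j' := by
              by_contra hne
              exact hbad (hoth' j hj hne)
            subst hjj
            exact hwin h25'
        -- bad has ≥ 2 entries: B is False, and A cannot succeed
        · have hknd : k ≠ k2 := by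
            have hnd := nodup_pvBadHead l
            rw [hbe] at hnd
            exact (List.nodup_cons.1 hnd).1 ∘ (fun h => h ▸ List.mem_cons_self ..)
          have hk1 : k ∈ pvBadHead l := by rw [hbe]; exact List.mem_cons_self ..
          have hk2 : k2 ∈ pvBadHead l := by
            rw [hbe]; exact List.mem_cons_of_mem _ (List.mem_cons_self ..)
          obtain ⟨j1, hj17, rfl, hbad1⟩ := (mem_pvBadHead h7).1 hk1
          obtain ⟨j2, hj27, rfl, hbad2⟩ := (mem_pvBadHead h7).1 hk2
          have hne : j1 ≠ j2 := fun h => hknd (by exact_mod_cast h)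
          have hB : pvBadTest l ((j1 : Int) :: (j2 : Int) :: rest2) = false := rfl
          show pvALoop l 0 = pvBadTest l ((j1 : Int) :: (j2 : Int) :: rest2)
          rw [hB]
          refine pvALoop_false_of h7 ⟨j1, by omega, hbad1⟩ ?_
          intro j' hj' hj7' h25' hoth'
          have h1 : j1 = j' := by
            by_contra hx
            exact hbad1 (hoth' j1 (by omega) hx)
          have h2 : j2 = j' := by
            by_contra hx
            exact hbad2 (hoth' j2 (by omega) hx)
          exact hne (h1.trans h2.symm)
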